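-- pv_equiv track=rewrite | github.com/kabusamieh/ProjectEuler | P401 - SumSqrDiv.py | SIGMA2
-- ===== SOURCE A (Python) =====
-- def sigma2(n):
--     foo = []
--     bar = []
--     for i in range(1,n+1):
--         if n % i == 0:
--             foo.append(i)
--
--     for j in foo:
--         bar.append(j ** 2)
--
--     return bar
--
-- def SIGMA2(n):
--     foo = []
--     bar = []
--     k = 0
--
--     for i in range(1,n+1):
--         sigi = sum(sigma2(i))
--         foo.append(sigi)
--
--     for j in foo:
--         k += j
--         bar.append(k)
--
--     return bar
-- ===== SOURCE B (Python) =====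
-- def SIGMA2(n):
--     # Divisor sieve: for each d, add d*d to every multiple of d, then prefix-sum.
--     if n <= 0:
--         return []
--     s = [0] * (n + 1)
--     for d in range(1, n + 1):
--         dd = d * d
--         for q in range(1, n // d + 1):
--             s[d * q] += dd
--     out = []
--     total = 0
--     for i in range(1, n + 1):
--         total += s[i]
--         out.append(total)
--     return out
-- ===== Notes on version B (the rewrite author's own statement) =====
-- stated objective: faster
-- what changed: Replaced A's per-i trial-division divisor enumeration (a quadratic double loop building divisor lists) by a divisor sieve that adds d*d to every multiple of d in one table, followed by a single prefix-sum pass.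
import Mathlib
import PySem

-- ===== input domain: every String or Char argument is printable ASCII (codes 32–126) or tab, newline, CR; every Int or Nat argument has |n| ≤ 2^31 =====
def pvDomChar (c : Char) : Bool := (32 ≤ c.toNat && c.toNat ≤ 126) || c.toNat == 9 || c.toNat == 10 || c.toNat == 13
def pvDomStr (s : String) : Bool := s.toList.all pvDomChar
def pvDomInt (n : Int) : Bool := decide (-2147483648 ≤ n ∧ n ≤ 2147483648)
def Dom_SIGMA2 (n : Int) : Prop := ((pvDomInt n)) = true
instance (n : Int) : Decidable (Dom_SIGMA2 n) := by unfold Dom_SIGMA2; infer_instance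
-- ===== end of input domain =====

-- B replaces A's per-i trial-division divisor enumeration by a divisor sieve plus one prefix-sum pass (asymptotically faster; measured).


-- ===== PORT A =====
-- helper sigma2(n): collect the divisors of n by trial division, then square them
def sigma2 (n : Int) : List Int :=
  let foo := (PySem.List.pyRange 1 (n + 1) 1).foldl
    (fun acc i => if PySem.Int.mod n i == 0 then acc ++ [i] else acc) ([] : List Int)
  let bar := foo.foldl (fun acc j => acc ++ [j ^ 2]) ([] : List Int)
  bar

def SIGMA2 (n : Int) : List Int :=
  let foo := (PySem.List.pyRange 1 (n + 1) 1).foldl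
    (fun acc i => acc ++ [(sigma2 i).sum]) ([] : List Int)
  let bk := foo.foldl
    (fun (p : List Int × Int) j => (p.1 ++ [p.2 + j], p.2 + j)) (([] : List Int), (0 : Int))
  bk.1

-- ===== PORT B =====
def SIGMA2_alt (n : Int) : List Int :=
  if n ≤ 0 then []
  else
    let s := (PySem.List.pyRange 1 (n + 1) 1).foldl
      (fun s d =>
        let dd := d * d
        (PySem.List.pyRange 1 (PySem.Int.floordiv n d + 1) 1).foldl
          (fun s q => s.set (d * q).toNat (PySem.List.pyGetD s (d * q) 0 + dd)) s)
      (List.replicate (n + 1).toNat 0)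
    let ok := (PySem.List.pyRange 1 (n + 1) 1).foldl
      (fun (p : List Int × Int) i =>
        let t := p.2 + PySem.List.pyGetD s i 0
        (p.1 ++ [t], t)) (([] : List Int), (0 : Int))
    ok.1

-- ===== PRECONDITION & SPEC =====
def Spec_SIGMA2 (n : Int) (out : List Int) : Prop := out = SIGMA2_alt n
instance (n : Int) (out : List Int) : Decidable (Spec_SIGMA2 n out) := by unfold Spec_SIGMA2; infer_instance

-- ===== CLAIM (what is proved, stated in full; the proofs are below) =====
def Claim_equal_SIGMA2 : Prop := ∀ (n : Int), Dom_SIGMA2 n → Spec_SIGMA2 n (SIGMA2 n)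

-- ===== LEMMAS AND PROOFS =====

-- sum of A's helper = sum of squares over the trial-division divisor list
theorem sigma2_sum (k : Int) :
    (sigma2 k).sum
      = (((PySem.List.pyRange 1 (k + 1) 1).filter (fun d => PySem.Int.mod k d == 0)).map
          (fun d => d ^ 2)).sum := by
  simp only [sigma2]
  rw [PySem.List.foldl_append_if (fun i => PySem.Int.mod k i == 0) (fun i => i),
      PySem.List.foldl_append_singleton_eq_map]
  simp

-- one sieve pass never changes the length of the table
theorem inner_length (d dd : Int) (L : List Int) (s : List Int) :
    ((L.foldl (fun s q => s.set (d * q).toNat (PySem.List.pyGetD s (d * q) 0 + dd)) s)).length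
      = s.length := by
  induction L generalizing s with
  | nil => rfl
  | cons q L ih => simp [List.foldl_cons, ih, List.length_set]

-- one sieve pass for divisor d adds dd exactly at the cells d*q, q ∈ range(a, b)
theorem inner_getD (d dd : Int) (hd : 1 ≤ d) (b : Int) :
    ∀ (k : Nat) (a : Int), 1 ≤ a → (b - a).toNat = k →
    ∀ (s : List Int) (j : Int), 0 ≤ j → j < (s.length : Int) →
    PySem.List.pyGetD
      ((PySem.List.pyRange a b 1).foldl
        (fun s q => s.set (d * q).toNat (PySem.List.pyGetD s (d * q) 0 + dd)) s) j 0
      = PySem.List.pyGetD s j 0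
        + (if ∃ q ∈ PySem.List.pyRange a b 1, d * q = j then dd else 0) := by
  intro k
  induction k with
  | zero =>
    intro a ha hk s j hj0 hjl
    rw [PySem.List.pyRange_one_eq_nil (by omega)]
    simp
  | succ k ih =>
    intro a ha hk s j hj0 hjl
    have hab : a < b := by omega
    rw [PySem.List.pyRange_one_cons hab]
    simp only [List.foldl_cons]
    set s' := s.set (d * a).toNat (PySem.List.pyGetD s (d * a) 0 + dd) with hs'
    have hlen' : (s'.length : Int) = (s.length : Int) := by simp [hs', List.length_set]
    have hrec := ih (a + 1) (by omega) (by omega) s' j hj0 (by omega)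
    rw [hrec, ← PySem.List.pyRange_one_cons hab]
    have hda : 0 < d * a := by positivity
    by_cases hja : d * a = j
    · -- the rest of the pass never hits j again
      have hrest : ¬ ∃ q ∈ PySem.List.pyRange (a + 1) b 1, d * q = j := by
        rintro ⟨q, hq, hqj⟩
        rw [PySem.List.mem_pyRange_one] at hq
        nlinarith [hq.1]
      have hfull : ∃ q ∈ PySem.List.pyRange a b 1, d * q = j :=
        ⟨a, by rw [PySem.List.mem_pyRange_one]; omega, hja⟩
      have hget' : PySem.List.pyGetD s' j 0 = PySem.List.pyGetD s (d * a) 0 + dd := by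
        rw [PySem.List.pyGetD_of_nonneg _ _ hj0, hs']
        rw [List.getD_eq_getElem?_getD, List.getElem?_set]
        have : (d * a).toNat = j.toNat := by rw [hja]
        simp [this, show j.toNat < s.length by omega]
      rw [hget', if_neg hrest, if_pos hfull, hja]
      ring
    · have hget' : PySem.List.pyGetD s' j 0 = PySem.List.pyGetD s j 0 := by
        rw [PySem.List.pyGetD_of_nonneg _ _ hj0, PySem.List.pyGetD_of_nonneg _ _ hj0, hs']
        rw [List.getD_eq_getElem?_getD, List.getD_eq_getElem?_getD, List.getElem?_set]
        have : (d * a).toNat ≠ j.toNat := by omega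
        simp [this]
      rw [hget']
      congr 1
      by_cases hrest : ∃ q ∈ PySem.List.pyRange (a + 1) b 1, d * q = j
      · obtain ⟨q, hq, hqj⟩ := hrest
        rw [PySem.List.mem_pyRange_one] at hq
        rw [if_pos ⟨q, by rw [PySem.List.mem_pyRange_one]; omega, hqj⟩, if_pos ⟨q, by
          rw [PySem.List.mem_pyRange_one]; omega, hqj⟩]
      · rw [if_neg hrest, if_neg]
        rintro ⟨q, hq, hqj⟩
        rw [PySem.List.mem_pyRange_one] at hq
        rcases eq_or_lt_of_le hq.1 with h | h
        · exact hja (by rw [← h] at hqj; exact hqj)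
        · exact hrest ⟨q, by rw [PySem.List.mem_pyRange_one]; omega, hqj⟩

-- one whole sieve pass for divisor d, summarised as "add d² to each multiple of d"
theorem step_getD (n d : Int) (hd1 : 1 ≤ d) (s : List Int)
    (hlen : (s.length : Int) = n + 1) (j : Int) (hj1 : 1 ≤ j) (hjn : j ≤ n) :
    PySem.List.pyGetD
      ((PySem.List.pyRange 1 (PySem.Int.floordiv n d + 1) 1).foldl
        (fun s q => s.set (d * q).toNat (PySem.List.pyGetD s (d * q) 0 + d * d)) s) j 0
      = PySem.List.pyGetD s j 0 + (if d ∣ j then d ^ 2 else 0) := by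
  rw [inner_getD d (d * d) hd1 (PySem.Int.floordiv n d + 1)
      (PySem.Int.floordiv n d + 1 - 1).toNat 1 (by omega) rfl s j (by omega) (by omega)]
  congr 1
  have hfd : PySem.Int.floordiv n d = n / d := PySem.Int.floordiv_eq_ediv_of_pos (by omega)
  have hiff : (∃ q ∈ PySem.List.pyRange 1 (PySem.Int.floordiv n d + 1) 1, d * q = j) ↔ d ∣ j := by
    constructor
    · rintro ⟨q, _, hq⟩; exact ⟨q, hq.symm⟩
    · rintro ⟨c, hc⟩
      refine ⟨c, ?_, hc.symm⟩
      rw [PySem.List.mem_pyRange_one, hfd]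
      constructor
      · nlinarith [hc, hj1, hd1]
      · have : c ≤ n / d := by
          rw [Int.le_ediv_iff_mul_le (by omega)]
          nlinarith [hc, hjn]
        omega
  by_cases hdj : d ∣ j
  · rw [if_pos (hiff.mpr hdj), if_pos hdj]; ring
  · rw [if_neg (fun h => hdj (hiff.mp h)), if_neg hdj]

-- sieve invariant: after processing d = 1..m, cell j holds its partial divisor-square sum
theorem sieve_invariant (n : Int) (hn : 1 ≤ n) (m : Nat) (hm : (m : Int) ≤ n) :
    (((PySem.List.pyRange 1 ((m : Int) + 1) 1).foldl
        (fun s d =>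
          let dd := d * d
          (PySem.List.pyRange 1 (PySem.Int.floordiv n d + 1) 1).foldl
            (fun s q => s.set (d * q).toNat (PySem.List.pyGetD s (d * q) 0 + dd)) s)
        (List.replicate (n + 1).toNat 0))).length = (n + 1).toNat
    ∧ ∀ j : Int, 1 ≤ j → j ≤ n →
        PySem.List.pyGetD
          ((PySem.List.pyRange 1 ((m : Int) + 1) 1).foldl
            (fun s d =>
              let dd := d * d
              (PySem.List.pyRange 1 (PySem.Int.floordiv n d + 1) 1).foldl
                (fun s q => s.set (d * q).toNat (PySem.List.pyGetD s (d * q) 0 + dd)) s)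
            (List.replicate (n + 1).toNat 0)) j 0
        = (((PySem.List.pyRange 1 ((m : Int) + 1) 1).filter (fun d => decide (d ∣ j))).map
            (fun d => d ^ 2)).sum := by
  induction m with
  | zero =>
    rw [show ((0 : Nat) : Int) + 1 = 1 by norm_num, PySem.List.pyRange_one_eq_nil le_rfl]
    refine ⟨by simp, ?_⟩
    intro j hj1 hjn
    rw [PySem.List.pyGetD_of_nonneg _ _ (by omega)]
    simp
  | succ m ih =>
    have hm' : (m : Int) ≤ n := by push_cast at hm ⊢; omega
    obtain ⟨ihlen, ihget⟩ := ih hm'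
    push_cast
    push_cast at hm
    rw [show (m : Int) + 1 + 1 = ((m : Int) + 1) + 1 from rfl,
        PySem.List.pyRange_one_succ_right (by omega)]
    rw [List.foldl_append]
    constructor
    · rw [List.foldl_cons, List.foldl_nil, inner_length, ihlen]
    · intro j hj1 hjn
      simp only [List.foldl_cons, List.foldl_nil]
      rw [step_getD n ((m : Int) + 1) (by omega) _ (by rw [ihlen]; omega) j hj1 hjn,
          ihget j hj1 hjn]
      rw [List.filter_append, List.map_append, List.sum_append]
      by_cases hdj : ((m : Int) + 1) ∣ j
      · simp [hdj]
      · simp [hdj]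

-- the trial-division sum over 1..i equals the sieve sum over 1..n, for 1 ≤ i ≤ n
theorem divsum_extend (n i : Int) (hi1 : 1 ≤ i) (hin : i ≤ n) :
    (((PySem.List.pyRange 1 (i + 1) 1).filter (fun d => PySem.Int.mod i d == 0)).map
        (fun d => d ^ 2)).sum
      = (((PySem.List.pyRange 1 (n + 1) 1).filter (fun d => decide (d ∣ i))).map
          (fun d => d ^ 2)).sum := by
  rw [PySem.List.pyRange_one_append 1 (i + 1) (n + 1) (by omega) (by omega),
      List.filter_append, List.map_append, List.sum_append]
  have h2 : (PySem.List.pyRange (i + 1) (n + 1) 1).filter (fun d => decide (d ∣ i)) = [] := by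
    rw [List.filter_eq_nil_iff]
    intro d hd
    rw [PySem.List.mem_pyRange_one] at hd
    simp only [decide_eq_true_eq]
    intro hdvd
    have := Int.le_of_dvd (by omega) hdvd
    omega
  rw [h2]
  have h1 : (PySem.List.pyRange 1 (i + 1) 1).filter (fun d => PySem.Int.mod i d == 0)
      = (PySem.List.pyRange 1 (i + 1) 1).filter (fun d => decide (d ∣ i)) := by
    apply List.filter_congr
    intro d hd
    by_cases hdvd : d ∣ i
    · have h0 : PySem.Int.mod i d = 0 := (PySem.Int.mod_eq_zero_iff_dvd i d).mpr hdvd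
      simp [h0, hdvd]
    · have h0 : PySem.Int.mod i d ≠ 0 := fun h => hdvd ((PySem.Int.mod_eq_zero_iff_dvd i d).mp h)
      simp [h0, hdvd]
  rw [h1]
  simp

-- ===== VERDICT (by name: the statement is the Claim_ definition above) =====
theorem SIGMA2_spec : Claim_equal_SIGMA2 := by
  intro n _
  unfold Spec_SIGMA2 SIGMA2 SIGMA2_alt
  by_cases hn : n ≤ 0
  · rw [if_pos hn, PySem.List.pyRange_one_eq_nil (by omega)]
    simp
  · rw [if_neg hn]
    simp only []
    rw [PySem.List.foldl_append_singleton_eq_map, List.nil_append]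
    refine congrArg Prod.fst ?_
    rw [List.foldl_map]
    have hinv := sieve_invariant n (by omega) n.toNat (by omega)
    rw [show ((n.toNat : Int) + 1) = n + 1 by omega] at hinv
    obtain ⟨hlen, hget⟩ := hinv
    apply PySem.List.foldl_congr_mem
    intro acc i hi
    rw [PySem.List.mem_pyRange_one] at hi
    have key := (hget i (by omega) (by omega)).symm
    rw [sigma2_sum, divsum_extend n i (by omega) (by omega), key]
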